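-- pv_equiv track=rewrite | github.com/NickJD/ORForise | src/ORForise/ORForise_Analysis/genome_Metrics.py | stop_Codon_Count
-- ===== SOURCE A (Python) =====
-- def stop_Codon_Count(stop_Codons):
--     tag, taa, tga, other = 0, 0, 0, 0
--     other_Stops = []
--     for stop in stop_Codons:
--         stop
--         if stop == 'TAG':
--             tag += 1
--         elif stop == 'TAA':
--             taa += 1
--         elif stop == 'TGA':
--             tga += 1
--         else:
--             other += 1
--             other_Stops.append(stop)
--     tag_p = format(100 * tag / len(stop_Codons), '.2f')
--     taa_p = format(100 * taa / len(stop_Codons), '.2f')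
--     tga_p = format(100 * tga / len(stop_Codons), '.2f')
--     other_Stop_P = format(100 * other / len(stop_Codons), '.2f')
--     return tag_p, taa_p, tga_p, other_Stop_P, other_Stops
-- ===== SOURCE B (Python) =====
-- def stop_Codon_Count(stop_Codons):
--     # histogram once, then read the three canonical codons from it
--     n = len(stop_Codons)
--     counts = {}
--     for s in stop_Codons:
--         counts[s] = counts.get(s, 0) + 1
--     tag = counts.get('TAG', 0)
--     taa = counts.get('TAA', 0)
--     tga = counts.get('TGA', 0)
--     other_Stops = [s for s in stop_Codons if s not in ('TAG', 'TAA', 'TGA')]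
--     def pct(c):
--         return format(100 * c / n, '.2f')
--     return pct(tag), pct(taa), pct(tga), pct(n - tag - taa - tga), other_Stops
-- ===== Notes on version B (the rewrite author's own statement) =====
-- stated objective: alternative
-- what changed: Replaces A's five-way branching loop with four scalar counters by building a dict histogram of all codons once, reading the three canonical codon counts from it, deriving 'other' by arithmetic, and collecting other_Stops with a separate filter comprehension.
import Mathlib
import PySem

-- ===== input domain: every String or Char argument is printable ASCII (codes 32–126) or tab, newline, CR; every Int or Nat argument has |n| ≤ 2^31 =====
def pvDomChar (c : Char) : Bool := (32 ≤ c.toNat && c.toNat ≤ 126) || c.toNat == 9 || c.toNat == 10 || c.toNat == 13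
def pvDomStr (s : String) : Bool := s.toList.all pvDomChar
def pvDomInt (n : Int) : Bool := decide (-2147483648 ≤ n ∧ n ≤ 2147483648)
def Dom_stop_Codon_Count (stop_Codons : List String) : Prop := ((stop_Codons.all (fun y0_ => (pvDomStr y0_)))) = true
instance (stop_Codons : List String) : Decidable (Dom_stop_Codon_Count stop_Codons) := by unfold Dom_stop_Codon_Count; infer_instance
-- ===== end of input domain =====

-- B replaces A's five-way branching loop (four scalar counters + appended list) by a dict
-- histogram built once, dict lookups for the three canonical codons, arithmetic for 'other'
-- and a filter for other_Stops. The pvFmt* helpers below port Python's builtin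
-- `format(100*c/len, '.2f')` exactly (IEEE-754 double division, then half-even decimal
-- rounding); both versions call that same builtin, so the helper is shared.

-- round-half-even of a/b (b > 0); exact on naturals
def pvRndDiv (a b : Nat) : Nat :=
  let q := a / b
  let r := a % b
  if 2 * r < b then q
  else if 2 * r > b then q + 1
  else if q % 2 = 0 then q else q + 1

-- candidate significand for scale s: round(a * 2^s / n)
def pvMval (a n : Nat) (s : Int) : Nat :=
  if 0 ≤ s then pvRndDiv (a * 2 ^ s.toNat) n else pvRndDiv a (n * 2 ^ (-s).toNat)

-- normalize the scale so the significand lands in [2^52, 2^53); ≤ 2 adjustments ever needed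
def pvAdjust (a n : Nat) (s : Int) : Nat → Nat × Int
  | 0 => (pvMval a n s, -s)
  | fuel + 1 =>
    let m := pvMval a n s
    if m ≥ 2 ^ 53 then pvAdjust a n (s - 1) fuel
    else if m < 2 ^ 52 then pvAdjust a n (s + 1) fuel
    else (m, -s)

-- the IEEE-754 double nearest to a/n (a ≥ 0, n > 0, no overflow/subnormal in range used),
-- as (significand, binary exponent): value = m * 2^e
def pvDoubleDiv (a n : Nat) : Nat × Int :=
  if a = 0 then (0, 0)
  else pvAdjust a n ((52 : Int) + (Nat.log2 n + 1) - (Nat.log2 a + 1)) 4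

-- Python format(x, '.2f') for the nonnegative double m * 2^e (half-even to 2 decimals)
def pvFmt2f (me : Nat × Int) : String :=
  let N := if 0 ≤ me.2 then me.1 * 100 * 2 ^ me.2.toNat
           else pvRndDiv (me.1 * 100) (2 ^ (-me.2).toNat)
  toString (N / 100) ++ "." ++ (if N % 100 < 10 then "0" else "") ++ toString (N % 100)

-- format(100 * c / n, '.2f') as Python computes it
def pvFmtPct (c n : Nat) : String := pvFmt2f (pvDoubleDiv (100 * c) n)

-- ===== PORT A =====
-- A's for-loop: one branching pass keeping four counters and the other_Stops list
def pvALoop : List String → Nat → Nat → Nat → Nat → List String → Nat × Nat × Nat × Nat × List String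
  | [], tag, taa, tga, other, os => (tag, taa, tga, other, os)
  | stop :: rest, tag, taa, tga, other, os =>
    if stop = "TAG" then pvALoop rest (tag + 1) taa tga other os
    else if stop = "TAA" then pvALoop rest tag (taa + 1) tga other os
    else if stop = "TGA" then pvALoop rest tag taa (tga + 1) other os
    else pvALoop rest tag taa tga (other + 1) (os ++ [stop])

def stop_Codon_Count (stop_Codons : List String) : String × String × String × String × List String :=
  match pvALoop stop_Codons 0 0 0 0 [] with
  | (tag, taa, tga, other, other_Stops) =>
    (pvFmtPct tag stop_Codons.length, pvFmtPct taa stop_Codons.length,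
     pvFmtPct tga stop_Codons.length, pvFmtPct other stop_Codons.length, other_Stops)

-- ===== PORT B =====
-- B's local `pct(c)`; c is a Python int (here a nonnegative Int read from the dict)
def pvPct (c : Int) (n : Nat) : String := pvFmtPct c.toNat n

def stop_Codon_Count_alt (stop_Codons : List String) : String × String × String × String × List String :=
  let n := stop_Codons.length
  let counts : PySem.Dict String Int :=
    stop_Codons.foldl (fun d s => d.insert s (d.getD s 0 + 1)) PySem.Dict.empty
  let tag := counts.getD "TAG" 0
  let taa := counts.getD "TAA" 0
  let tga := counts.getD "TGA" 0
  let other_Stops := stop_Codons.filter (fun s => !(s == "TAG" || s == "TAA" || s == "TGA"))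
  (pvPct tag n, pvPct taa n, pvPct tga n, pvPct ((n : Int) - tag - taa - tga) n, other_Stops)

-- ===== PRECONDITION & SPEC =====
-- Python A raises ZeroDivisionError on the empty list (len = 0); B raises there too.
def Pre_stop_Codon_Count (stop_Codons : List String) : Prop := stop_Codons ≠ []
instance (stop_Codons : List String) : Decidable (Pre_stop_Codon_Count stop_Codons) := by unfold Pre_stop_Codon_Count; infer_instance
def pvWitness_stop_Codon_Count : List String := ["TAG", "TGA", "CAT"]

def Spec_stop_Codon_Count (stop_Codons : List String) (out : String × String × String × String × List String) : Prop := out = stop_Codon_Count_alt stop_Codons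
instance (stop_Codons : List String) (out : String × String × String × String × List String) : Decidable (Spec_stop_Codon_Count stop_Codons out) := by unfold Spec_stop_Codon_Count; infer_instance

-- ===== CLAIM (what is proved, stated in full; the proofs are below) =====
def Claim_equal_stop_Codon_Count : Prop := ∀ (stop_Codons : List String), Dom_stop_Codon_Count stop_Codons → Pre_stop_Codon_Count stop_Codons → Spec_stop_Codon_Count stop_Codons (stop_Codon_Count stop_Codons)

-- ===== LEMMAS AND PROOFS =====

def pvOther (s : String) : Bool := !(s == "TAG" || s == "TAA" || s == "TGA")

theorem pvALoop_eq (l : List String) : ∀ (tag taa tga other : Nat) (os : List String),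
    pvALoop l tag taa tga other os =
      (tag + l.count "TAG", taa + l.count "TAA", tga + l.count "TGA",
       other + (l.filter pvOther).length, os ++ l.filter pvOther) := by
  induction l with
  | nil => intro tag taa tga other os; simp [pvALoop]
  | cons stop rest ih =>
    intro tag taa tga other os
    have hG : pvOther "TAG" = false := by decide
    have hA : pvOther "TAA" = false := by decide
    have hT : pvOther "TGA" = false := by decide
    by_cases h1 : stop = "TAG"
    · simp [pvALoop, h1, ih, List.filter_cons, hG, List.count_cons]; omega
    · by_cases h2 : stop = "TAA"
      · simp [pvALoop, h1, h2, ih, List.filter_cons, hA, List.count_cons]; omega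
      · by_cases h3 : stop = "TGA"
        · simp [pvALoop, h1, h2, h3, ih, List.filter_cons, hT, List.count_cons]; omega
        · have hp : pvOther stop = true := by simp [pvOther, h1, h2, h3]
          simp [pvALoop, h1, h2, h3, ih, List.filter_cons, hp, List.count_cons]
          omega

theorem pv_length_split (l : List String) :
    l.length = l.count "TAG" + l.count "TAA" + l.count "TGA" + (l.filter pvOther).length := by
  induction l with
  | nil => simp
  | cons stop rest ih =>
    have hG : pvOther "TAG" = false := by decide
    have hA : pvOther "TAA" = false := by decide
    have hT : pvOther "TGA" = false := by decide
    by_cases h1 : stop = "TAG"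
    · simp [h1, List.count_cons, List.filter_cons, hG]; omega
    · by_cases h2 : stop = "TAA"
      · simp [h1, h2, List.count_cons, List.filter_cons, hA]; omega
      · by_cases h3 : stop = "TGA"
        · simp [h1, h2, h3, List.count_cons, List.filter_cons, hT]; omega
        · have hp : pvOther stop = true := by simp [pvOther, h1, h2, h3]
          simp [h1, h2, h3, List.count_cons, List.filter_cons, hp]; omega

-- B's histogram lookup is the plain count
theorem pv_histD (l : List String) (v : String) :
    (l.foldl (fun d s => d.insert s (d.getD s 0 + 1)) (PySem.Dict.empty : PySem.Dict String Int)).getD v 0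
      = (l.count v : Int) := by
  rw [PySem.Dict.getD_foldl_insert_add_one]
  simp [PySem.Dict.getD_empty]

-- ===== VERDICT (by name: the statement is the Claim_ definition above) =====
theorem stop_Codon_Count_spec : Claim_equal_stop_Codon_Count := by
  intro l _ _
  unfold Spec_stop_Codon_Count stop_Codon_Count stop_Codon_Count_alt
  rw [pvALoop_eq]
  simp only [pv_histD, pvPct, Int.toNat_natCast]
  have h4 : ((l.length : Int) - l.count "TAG" - l.count "TAA" - l.count "TGA").toNat
      = (l.filter pvOther).length := by have := pv_length_split l; omega
  simp [h4]
  exact List.filter_congr (fun s _ => by simp [pvOther])
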